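-- pv_equiv track=rewrite | github.com/w1u2d3i4/phys-moe | stat_ccdc_sg_distribution.py | classify_space_groups
-- ===== SOURCE A (Python) =====
-- def classify_space_groups(counts):
--     """
--     根据样本数将空间群分为Head、Medium、Tail三类
--     返回：dict，{'head': [(idx, count), ...], 'medium': [...], 'tail': [...]}
--     """
--     head = []  # >1000
--     medium = []  # 100-1000
--     tail = []  # <100
--
--     for idx, count in counts.items():
--         if count > 1000:
--             head.append((idx, count))
--         elif count >= 100:
--             medium.append((idx, count))
--         else:
--             tail.append((idx, count))
--
--     # 按样本数降序排序
--     head.sort(key=lambda x: x[1], reverse=True)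
--     medium.sort(key=lambda x: x[1], reverse=True)
--     tail.sort(key=lambda x: x[1], reverse=True)
--
--     return {'head': head, 'medium': medium, 'tail': tail}
-- ===== SOURCE B (Python) =====
-- def classify_space_groups(counts):
--     # One global stable descending sort, then three filters over the ordered list.
--     ordered = sorted(counts.items(), key=lambda x: x[1], reverse=True)
--     return {
--         'head': [p for p in ordered if p[1] > 1000],
--         'medium': [p for p in ordered if 100 <= p[1] <= 1000],
--         'tail': [p for p in ordered if p[1] < 100],
--     }
-- ===== Notes on version B (the rewrite author's own statement) =====
-- stated objective: alternative
-- what changed: Instead of partitioning into three buckets first and sorting each bucket, B sorts all items once (stable, descending by count) and then takes three filters of the sorted list; sort stability makes each filtered bucket identical to A's per-bucket sort.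
import Mathlib
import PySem

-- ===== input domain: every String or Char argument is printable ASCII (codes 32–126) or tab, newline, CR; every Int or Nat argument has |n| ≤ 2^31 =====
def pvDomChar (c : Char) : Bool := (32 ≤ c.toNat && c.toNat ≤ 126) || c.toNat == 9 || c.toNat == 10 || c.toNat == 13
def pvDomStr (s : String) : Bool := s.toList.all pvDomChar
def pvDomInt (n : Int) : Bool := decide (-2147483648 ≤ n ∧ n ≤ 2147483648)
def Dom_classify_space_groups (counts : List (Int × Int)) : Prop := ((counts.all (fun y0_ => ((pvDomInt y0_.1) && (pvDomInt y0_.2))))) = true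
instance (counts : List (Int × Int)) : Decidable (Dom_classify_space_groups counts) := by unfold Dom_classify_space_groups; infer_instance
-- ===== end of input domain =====

-- B replaces A's partition-then-sort-each-bucket by one global stable descending sort
-- followed by three filters (objective: alternative decomposition, same cost).

-- ===== PORT A =====
-- A: loop over the items appending into head/medium/tail, then sort each bucket
-- descending by count, return the dict {'head': …, 'medium': …, 'tail': …}.
def classify_space_groups (counts : List (Int × Int)) : List (String × List (Int × Int)) :=
  let acc := counts.foldl
    (fun (acc : List (Int × Int) × List (Int × Int) × List (Int × Int)) x =>
      if x.2 > 1000 then (acc.1 ++ [x], acc.2.1, acc.2.2)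
      else if x.2 ≥ 100 then (acc.1, acc.2.1 ++ [x], acc.2.2)
      else (acc.1, acc.2.1, acc.2.2 ++ [x]))
    ([], [], [])
  [("head", PySem.List.sorted acc.1 (fun y => y.2) true),
   ("medium", PySem.List.sorted acc.2.1 (fun y => y.2) true),
   ("tail", PySem.List.sorted acc.2.2 (fun y => y.2) true)]

-- ===== PORT B =====
-- B: sort everything once (stable, descending by count), then three filters.
def classify_space_groups_alt (counts : List (Int × Int)) : List (String × List (Int × Int)) :=
  let ordered := PySem.List.sorted counts (fun x => x.2) true
  [("head", ordered.filter (fun p => decide (p.2 > 1000))),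
   ("medium", ordered.filter (fun p => decide (100 ≤ p.2) && decide (p.2 ≤ 1000))),
   ("tail", ordered.filter (fun p => decide (p.2 < 100)))]

-- ===== PRECONDITION & SPEC =====
def Spec_classify_space_groups (counts : List (Int × Int)) (out : List (String × List (Int × Int))) : Prop := out = classify_space_groups_alt counts
instance (counts : List (Int × Int)) (out : List (String × List (Int × Int))) : Decidable (Spec_classify_space_groups counts out) := by unfold Spec_classify_space_groups; infer_instance

-- ===== CLAIM (what is proved, stated in full; the proofs are below) =====
def Claim_equal_classify_space_groups : Prop := ∀ (counts : List (Int × Int)), Dom_classify_space_groups counts → Spec_classify_space_groups counts (classify_space_groups counts)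

-- ===== LEMMAS AND PROOFS =====

-- A's loop computes the three filters of the input (appended to the accumulators).
theorem pv_loop_components (xs : List (Int × Int)) (h m t : List (Int × Int)) :
    xs.foldl
      (fun (acc : List (Int × Int) × List (Int × Int) × List (Int × Int)) x =>
        if x.2 > 1000 then (acc.1 ++ [x], acc.2.1, acc.2.2)
        else if x.2 ≥ 100 then (acc.1, acc.2.1 ++ [x], acc.2.2)
        else (acc.1, acc.2.1, acc.2.2 ++ [x]))
      (h, m, t)
    = (h ++ xs.filter (fun x => decide (1000 < x.2)),
       m ++ xs.filter (fun x => !decide (1000 < x.2) && decide (100 ≤ x.2)),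
       t ++ xs.filter (fun x => !decide (1000 < x.2) && !decide (100 ≤ x.2))) := by
  induction xs generalizing h m t with
  | nil => simp
  | cons x xs ih =>
    by_cases h1 : 1000 < x.2
    · simp [List.foldl_cons, h1, ih]
    · by_cases h2 : 100 ≤ x.2 <;>
        simp [List.foldl_cons, h1, h2, ih, ge_iff_le]

-- filtering commutes with one stable descending insertion step, on a descending list
theorem pv_filter_insertBy {α : Type} (key : α → Int) (p : α → Bool) (x : α) (ys : List α)
    (hs : ys.Pairwise (fun a b => key b ≤ key a)) :
    (PySem.List.insertBy (fun a b => decide (key b < key a)) x ys).filter p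
      = if p x then PySem.List.insertBy (fun a b => decide (key b < key a)) x (ys.filter p)
        else ys.filter p := by
  induction ys with
  | nil => simp [PySem.List.insertBy]; split <;> simp_all [PySem.List.insertBy]
  | cons y ys ih =>
    rcases List.pairwise_cons.mp hs with ⟨hy, hs'⟩
    by_cases hb : key y < key x
    · -- x is inserted right here
      simp only [PySem.List.insertBy, hb, decide_true, if_true]
      by_cases hpy : p y
      · by_cases hpx : p x <;>
          simp [List.filter_cons, hpy, hpx, PySem.List.insertBy, hb]
      · by_cases hpx : p x
        · simp only [List.filter_cons, hpx, hpy, if_true, Bool.false_eq_true, if_false]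
          -- every element of ys.filter p has key < key x, so insertBy puts x in front
          cases hz : ys.filter p with
          | nil => simp [PySem.List.insertBy]
          | cons z zs =>
            have hzmem : z ∈ ys := List.mem_of_mem_filter (by rw [hz]; exact List.mem_cons_self ..)
            have : key z < key x := lt_of_le_of_lt (hy z hzmem) hb
            simp [PySem.List.insertBy, this]
        · simp [List.filter_cons, hpx, hpy]
    · -- x goes further down
      simp only [PySem.List.insertBy, hb, decide_false, Bool.false_eq_true, if_false]
      by_cases hpy : p y
      · by_cases hpx : p x <;>
          simp [List.filter_cons, hpy, hpx, ih hs', PySem.List.insertBy, hb]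
      · simp [List.filter_cons, hpy, ih hs']

-- filtering commutes with the stable descending sort
theorem pv_filter_sorted {α : Type} (key : α → Int) (p : α → Bool) (xs : List α) :
    (PySem.List.sorted xs key true).filter p
      = PySem.List.sorted (xs.filter p) key true := by
  induction xs using List.reverseRecOn with
  | nil => simp [PySem.List.sorted]
  | append_singleton xs x ih =>
    rw [PySem.List.sorted_rev_eq_foldl_insertBy, List.foldl_append,
        ← PySem.List.sorted_rev_eq_foldl_insertBy]
    simp only [List.foldl_cons, List.foldl_nil]
    rw [pv_filter_insertBy key p x _ (PySem.List.sorted_pairwise_rev xs key), ih]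
    by_cases hpx : p x
    · rw [List.filter_append]
      simp only [List.filter_cons, hpx, if_true, List.filter_nil]
      rw [PySem.List.sorted_rev_eq_foldl_insertBy (xs.filter p ++ [x]), List.foldl_append,
          ← PySem.List.sorted_rev_eq_foldl_insertBy]
      simp [hpx]
    · rw [List.filter_append]
      simp [List.filter_cons, hpx]

-- ===== VERDICT =====
theorem classify_space_groups_spec : Claim_equal_classify_space_groups := by
  intro counts _
  unfold Spec_classify_space_groups classify_space_groups classify_space_groups_alt
  simp only [pv_loop_components, List.nil_append]
  have hH := pv_filter_sorted (fun x : Int × Int => x.2) (fun x => decide (1000 < x.2)) counts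
  have hM := pv_filter_sorted (fun x : Int × Int => x.2)
      (fun x => !decide (1000 < x.2) && decide (100 ≤ x.2)) counts
  have hT := pv_filter_sorted (fun x : Int × Int => x.2)
      (fun x => !decide (1000 < x.2) && !decide (100 ≤ x.2)) counts
  rw [← hH, ← hM, ← hT]
  have eM : (PySem.List.sorted counts (fun x : Int × Int => x.2) true).filter
        (fun x => !decide (1000 < x.2) && decide (100 ≤ x.2))
      = (PySem.List.sorted counts (fun x : Int × Int => x.2) true).filter
        (fun p => decide (100 ≤ p.2) && decide (p.2 ≤ 1000)) := by
    apply List.filter_congr; intro a _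
    by_cases h1 : 1000 < a.2 <;> by_cases h2 : 100 ≤ a.2 <;> simp [h1, h2] <;> omega
  have eT : (PySem.List.sorted counts (fun x : Int × Int => x.2) true).filter
        (fun x => !decide (1000 < x.2) && !decide (100 ≤ x.2))
      = (PySem.List.sorted counts (fun x : Int × Int => x.2) true).filter
        (fun p => decide (p.2 < 100)) := by
    apply List.filter_congr; intro a _
    by_cases h1 : 1000 < a.2 <;> by_cases h2 : 100 ≤ a.2 <;> simp [h1, h2] <;> omega
  rw [eM, eT]
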